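-- pv_equiv track=rewrite | github.com/gnanarepo/aviso-core | config/hier_config.py | create_bottom_nodes
-- ===== SOURCE A (Python) =====
-- def create_bottom_nodes(drilldown, node, drilldown_tuples):
--     node_to_parent, labels = {}, {}
--     for drilldown_tuple in drilldown_tuples.get(node, []):
--         parent = '#'.join([drilldown, '', node])
--         for drilldown_values in (drilldown_tuple[:i + 1] for i in range(len(drilldown_tuple))):
--             child = '#'.join([drilldown, '||'.join(['|'.join([field, val])
--                                                     for field, val in drilldown_values if field and val]), node])
--             node_to_parent[child] = parent
--             labels[child] = drilldown_values[-1][1]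
--             parent = child
--     return node_to_parent, labels
-- ===== SOURCE B (Python) =====
-- def create_bottom_nodes(drilldown, node, drilldown_tuples):
--     # One pass per tuple: the joined middle string is maintained incrementally
--     # instead of re-joining every filtered prefix from scratch.
--     node_to_parent, labels = {}, {}
--     root = drilldown + '#' + '#' + node
--     for tup in drilldown_tuples.get(node, []):
--         parent = root
--         middle = ''
--         for field, val in tup:
--             if field and val:
--                 piece = field + '|' + val
--                 middle = piece if not middle else middle + '||' + piece
--             child = drilldown + '#' + middle + '#' + node
--             node_to_parent[child] = parent
--             labels[child] = val
--             parent = child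
--     return node_to_parent, labels
-- ===== Notes on version B (the rewrite author's own statement) =====
-- stated objective: alternative
-- what changed: The inner comprehension that re-filters and re-joins every prefix of the tuple from scratch is replaced by a single pass over the tuple that maintains the joined middle string incrementally.
import Mathlib
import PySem

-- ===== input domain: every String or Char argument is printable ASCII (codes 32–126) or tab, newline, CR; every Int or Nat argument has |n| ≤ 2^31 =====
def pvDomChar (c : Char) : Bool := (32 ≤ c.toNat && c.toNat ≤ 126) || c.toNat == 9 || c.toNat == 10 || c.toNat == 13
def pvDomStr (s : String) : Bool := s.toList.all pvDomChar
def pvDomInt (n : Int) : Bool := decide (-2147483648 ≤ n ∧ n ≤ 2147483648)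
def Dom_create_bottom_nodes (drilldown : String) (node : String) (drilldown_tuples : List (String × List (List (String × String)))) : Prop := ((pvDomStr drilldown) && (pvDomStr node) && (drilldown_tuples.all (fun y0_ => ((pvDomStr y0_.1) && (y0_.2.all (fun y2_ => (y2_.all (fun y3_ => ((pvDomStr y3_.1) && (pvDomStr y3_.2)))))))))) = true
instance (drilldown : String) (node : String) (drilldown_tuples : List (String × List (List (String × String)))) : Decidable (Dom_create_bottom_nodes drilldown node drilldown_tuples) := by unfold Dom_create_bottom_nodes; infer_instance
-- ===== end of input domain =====

-- B replaces A's per-prefix re-filter-and-re-join of the middle string by one pass over the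
-- tuple that maintains the joined middle incrementally (objective: alternative decomposition).

-- ===== PORT A =====
-- the generator (drilldown_tuple[:i+1] for i in range(len(drilldown_tuple)))
def pvPrefixesA (tup : List (String × String)) : List (List (String × String)) :=
  (PySem.List.pyRange 0 (tup.length : Int) 1).map (fun i => PySem.List.slice tup none (some (i + 1)))

-- child = '#'.join([drilldown, '||'.join('|'.join([field, val]) for truthy field, val), node])
def pvChildA (drilldown node : String) (dv : List (String × String)) : String :=
  PySem.Str.join "#" [drilldown,
    PySem.Str.join "||" ((dv.filter (fun p => decide (p.1 ≠ "" ∧ p.2 ≠ ""))).map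
      (fun p => PySem.Str.join "|" [p.1, p.2])), node]

-- body of A's inner loop; state = ((node_to_parent, labels), parent)
def pvStepA (drilldown node : String)
    (st : (PySem.Dict String String × PySem.Dict String String) × String)
    (dv : List (String × String)) : (PySem.Dict String String × PySem.Dict String String) × String :=
  let child := pvChildA drilldown node dv
  -- dv[-1]: dv is a nonempty prefix of the tuple, so the default pair is never used
  ((st.1.1.insert child st.2, st.1.2.insert child (PySem.List.pyGetD dv (-1) ("", "")).2), child)

def create_bottom_nodes (drilldown : String) (node : String) (drilldown_tuples : List (String × List (List (String × String)))) : (List (String × String)) × (List (String × String)) :=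
  let st := ((PySem.Dict.mk drilldown_tuples).getD node []).foldl
    (fun st tup =>
      let parent := PySem.Str.join "#" [drilldown, "", node]
      ((pvPrefixesA tup).foldl (pvStepA drilldown node) (st, parent)).1)
    (PySem.Dict.empty, PySem.Dict.empty)
  (st.1.items, st.2.items)

-- ===== PORT B =====
-- body of B's inner loop; state = ((node_to_parent, labels), parent, middle)
def pvStepB (drilldown node : String)
    (st : (PySem.Dict String String × PySem.Dict String String) × String × String)
    (row : String × String) : (PySem.Dict String String × PySem.Dict String String) × String × String :=
  let middle := if row.1 ≠ "" ∧ row.2 ≠ "" then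
      (if st.2.2 = "" then row.1 ++ "|" ++ row.2 else st.2.2 ++ "||" ++ (row.1 ++ "|" ++ row.2))
    else st.2.2
  let child := drilldown ++ "#" ++ middle ++ "#" ++ node
  ((st.1.1.insert child st.2.1, st.1.2.insert child row.2), child, middle)

def create_bottom_nodes_alt (drilldown : String) (node : String) (drilldown_tuples : List (String × List (List (String × String)))) : (List (String × String)) × (List (String × String)) :=
  let root := drilldown ++ "#" ++ "#" ++ node
  let st := ((PySem.Dict.mk drilldown_tuples).getD node []).foldl
    (fun st tup => (tup.foldl (pvStepB drilldown node) (st, root, "")).1)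
    (PySem.Dict.empty, PySem.Dict.empty)
  (st.1.items, st.2.items)

-- ===== PRECONDITION & SPEC =====
def Spec_create_bottom_nodes (drilldown : String) (node : String) (drilldown_tuples : List (String × List (List (String × String)))) (out : (List (String × String)) × (List (String × String))) : Prop := out = create_bottom_nodes_alt drilldown node drilldown_tuples
instance (drilldown : String) (node : String) (drilldown_tuples : List (String × List (List (String × String)))) (out : (List (String × String)) × (List (String × String))) : Decidable (Spec_create_bottom_nodes drilldown node drilldown_tuples out) := by unfold Spec_create_bottom_nodes; infer_instance

-- ===== CLAIM (what is proved, stated in full; the proofs are below) =====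
def Claim_equal_create_bottom_nodes : Prop := ∀ (drilldown : String) (node : String) (drilldown_tuples : List (String × List (List (String × String)))), Dom_create_bottom_nodes drilldown node drilldown_tuples → Spec_create_bottom_nodes drilldown node drilldown_tuples (create_bottom_nodes drilldown node drilldown_tuples)

-- ===== LEMMAS AND PROOFS =====

-- A's middle string: '||'.join of the filtered, '|'-joined prefix
def pvMid (l : List (String × String)) : String :=
  PySem.Str.join "||" ((l.filter (fun p => decide (p.1 ≠ "" ∧ p.2 ≠ ""))).map
    (fun p => PySem.Str.join "|" [p.1, p.2]))

-- the prefixes pre ++ [r₁], pre ++ [r₁, r₂], … in structural form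
def pvPrefs (pre : List (String × String)) : List (String × String) → List (List (String × String))
  | [] => []
  | r :: rs => (pre ++ [r]) :: pvPrefs (pre ++ [r]) rs

lemma pv_join1 (sep a : String) : PySem.Str.join sep [a] = a := by
  apply String.toList_inj.mp
  simp [PySem.Str.toList_join, PySem.Chars.join_singleton]

lemma pv_join2 (a b : String) : PySem.Str.join "|" [a, b] = a ++ "|" ++ b := by
  apply String.toList_inj.mp
  simp [PySem.Str.toList_join, PySem.Chars.join_cons_cons, PySem.Chars.join_singleton]

lemma pv_join3 (sep a b c : String) :
    PySem.Str.join sep [a, b, c] = a ++ sep ++ b ++ sep ++ c := by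
  apply String.toList_inj.mp
  simp [PySem.Str.toList_join, PySem.Chars.join_cons_cons, PySem.Chars.join_singleton]

lemma pv_root_eq (d n : String) : PySem.Str.join "#" [d, "", n] = d ++ "#" ++ "#" ++ n := by
  rw [pv_join3]
  apply String.toList_inj.mp
  simp

lemma pv_child_eq (d n : String) (dv : List (String × String)) :
    pvChildA d n dv = d ++ "#" ++ pvMid dv ++ "#" ++ n := by
  rw [pvChildA, pvMid, pv_join3]

lemma pv_chars_join_snoc (sep : List Char) (xs : List (List Char)) (x : List Char) (h : xs ≠ []) :
    PySem.Chars.join sep (xs ++ [x]) = PySem.Chars.join sep xs ++ sep ++ x := by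
  induction xs with
  | nil => exact absurd rfl h
  | cons a t ih =>
    cases t with
    | nil => simp [PySem.Chars.join_cons_cons, PySem.Chars.join_singleton]
    | cons b t' =>
      simp only [List.cons_append] at ih ⊢
      rw [PySem.Chars.join_cons_cons, ih (by simp), PySem.Chars.join_cons_cons]
      simp

lemma pv_join_snoc (sep : String) (xs : List String) (x : String) (h : xs ≠ []) :
    PySem.Str.join sep (xs ++ [x]) = PySem.Str.join sep xs ++ sep ++ x := by
  apply String.toList_inj.mp
  rw [String.toList_append, String.toList_append, PySem.Str.toList_join, PySem.Str.toList_join,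
    List.map_append, List.map_singleton, pv_chars_join_snoc _ _ _ (by simpa using h)]

lemma pv_chars_join_ne_nil (sep : List Char) (xs : List (List Char))
    (hne : ∀ y ∈ xs, y ≠ []) (h : xs ≠ []) : PySem.Chars.join sep xs ≠ [] := by
  cases xs with
  | nil => exact absurd rfl h
  | cons a t =>
    cases t with
    | nil => simpa [PySem.Chars.join_singleton] using hne a (by simp)
    | cons b t' =>
      rw [PySem.Chars.join_cons_cons]
      have : a ≠ [] := hne a (by simp)
      simp [this]

lemma pv_mid_eq_empty_iff (l : List (String × String)) :
    pvMid l = "" ↔ l.filter (fun p => decide (p.1 ≠ "" ∧ p.2 ≠ "")) = [] := by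
  constructor
  · intro h
    by_contra hf
    have htl : (pvMid l).toList = [] := by rw [h]; rfl
    rw [pvMid, PySem.Str.toList_join] at htl
    refine pv_chars_join_ne_nil _ _ ?_ ?_ htl
    · intro y hy
      simp only [List.map_map, List.mem_map] at hy
      obtain ⟨p, _, hp⟩ := hy
      subst hp
      simp [Function.comp, pv_join2]
    · simpa using hf
  · intro h
    rw [pvMid, h]
    rfl

lemma pv_mid_snoc (pre : List (String × String)) (r : String × String) :
    pvMid (pre ++ [r]) =
      if r.1 ≠ "" ∧ r.2 ≠ "" then
        (if pvMid pre = "" then r.1 ++ "|" ++ r.2 else pvMid pre ++ "||" ++ (r.1 ++ "|" ++ r.2))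
      else pvMid pre := by
  by_cases hr : r.1 ≠ "" ∧ r.2 ≠ ""
  · have hfr : List.filter (fun p => decide (p.1 ≠ "" ∧ p.2 ≠ "")) [r] = [r] := by
      simp [hr.1, hr.2]
    rw [if_pos hr]
    by_cases hm : pvMid pre = ""
    · rw [if_pos hm]
      have hf := (pv_mid_eq_empty_iff pre).mp hm
      rw [pvMid, List.filter_append, hf, List.nil_append, hfr, List.map_cons, List.map_nil,
        pv_join1, pv_join2]
    · rw [if_neg hm]
      have hf : pre.filter (fun p => decide (p.1 ≠ "" ∧ p.2 ≠ "")) ≠ [] := by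
        intro h; exact hm ((pv_mid_eq_empty_iff pre).mpr h)
      simp only [pvMid, List.filter_append, hfr, List.map_append, List.map_cons, List.map_nil]
      rw [pv_join_snoc _ _ _ (by simpa using hf), pv_join2]
  · rw [if_neg hr, pvMid, pvMid, List.filter_append]
    have hfr : List.filter (fun p => decide (p.1 ≠ "" ∧ p.2 ≠ "")) [r] = [] := by
      simp only [List.filter_cons, List.filter_nil]
      rw [if_neg (by simpa using hr)]
    rw [hfr, List.append_nil]

lemma pv_prefixesA_eq (tup : List (String × String)) : pvPrefixesA tup = pvPrefs [] tup := by
  have key : ∀ (t : List (String × String)) (pre : List (String × String)),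
      (List.range t.length).map (fun i => pre ++ t.take (i + 1)) = pvPrefs pre t := by
    intro t
    induction t with
    | nil => intro pre; simp [pvPrefs]
    | cons r rs ih =>
      intro pre
      rw [List.length_cons, List.range_succ_eq_map, List.map_cons, List.map_map, pvPrefs,
        ← ih (pre ++ [r])]
      congr 1
      apply List.map_congr_left
      intro i _
      simp [Function.comp, List.take_succ_cons]
  rw [pvPrefixesA, PySem.List.pyRange_zero_natCast, List.map_map, ← key tup []]
  apply List.map_congr_left
  intro i hi
  have h1 : ((i : Int) + 1) = ((i + 1 : Nat) : Int) := by push_cast; ring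
  simp only [Function.comp_apply]
  rw [h1]
  have h2 := PySem.List.slice_to tup (b := ((i + 1 : Nat) : Int)) (by omega)
  rw [h2]
  simp

-- the inner-loop correspondence: B's state carries parent and the incrementally built middle
lemma pv_inner_eq (d n : String) : ∀ (t pre : List (String × String))
    (st : PySem.Dict String String × PySem.Dict String String) (parent : String),
    t.foldl (pvStepB d n) (st, parent, pvMid pre) =
      (((pvPrefs pre t).foldl (pvStepA d n) (st, parent)).1,
       ((pvPrefs pre t).foldl (pvStepA d n) (st, parent)).2, pvMid (pre ++ t)) := by
  intro t
  induction t with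
  | nil => intro pre st parent; simp [pvPrefs]
  | cons r rs ih =>
    intro pre st parent
    rw [List.foldl_cons, pvPrefs, List.foldl_cons]
    have hstep : pvStepB d n (st, parent, pvMid pre) r =
        ((pvStepA d n (st, parent) (pre ++ [r])).1,
         (pvStepA d n (st, parent) (pre ++ [r])).2, pvMid (pre ++ [r])) := by
      simp only [pvStepB, pvStepA]
      rw [← pv_mid_snoc, pv_child_eq, PySem.List.pyGetD_neg_one_append_singleton]
    rw [hstep]
    have h := ih (pre ++ [r]) (pvStepA d n (st, parent) (pre ++ [r])).1
      (pvStepA d n (st, parent) (pre ++ [r])).2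
    simpa using h

-- ===== VERDICT (by name: the statement is the Claim_ definition above) =====
theorem create_bottom_nodes_spec : Claim_equal_create_bottom_nodes := by
  intro drilldown node drilldown_tuples _
  show _ = _
  simp only [create_bottom_nodes, create_bottom_nodes_alt]
  have key : ∀ (st : PySem.Dict String String × PySem.Dict String String)
      (tup : List (String × String)),
      ((pvPrefixesA tup).foldl (pvStepA drilldown node)
          (st, PySem.Str.join "#" [drilldown, "", node])).1
        = (tup.foldl (pvStepB drilldown node)
            (st, drilldown ++ "#" ++ "#" ++ node, "")).1 := by
    intro st tup
    have h0 : ("" : String) = pvMid [] := rfl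
    rw [pv_prefixesA_eq, pv_root_eq, h0, pv_inner_eq]
  have hfun : (fun (st : PySem.Dict String String × PySem.Dict String String)
        (tup : List (String × String)) =>
        ((pvPrefixesA tup).foldl (pvStepA drilldown node)
          (st, PySem.Str.join "#" [drilldown, "", node])).1)
      = (fun st tup => (tup.foldl (pvStepB drilldown node)
          (st, drilldown ++ "#" ++ "#" ++ node, "")).1) := by
    funext st tup
    exact key st tup
  rw [hfun]
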